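-- pv_equiv track=rewrite | github.com/capo-urjc/ffit | acme_nexys.py | adjust_coords
-- ===== SOURCE A (Python) =====
-- def adjust_coords(input_coords):
--     bounds = [[3, 18], [19, 27], [28, 87],                               # Clock region X0
--               [88, 93], [94, 107], [108, 118], [119, 127], [128, 145]]   # Clock region X1
--
--     offsets = [0, 1, 2, 3, 4, 5, 6, 7]
--
--     for coord in ["X_Lo", "X_Hi"]:
--         for o, b in zip(offsets, bounds):
--             if b[0] <= input_coords[coord] <= b[1]:
--                 input_coords[coord] -= o
--                 break
--     return input_coords
-- ===== SOURCE B (Python) =====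
-- def adjust_coords(input_coords):
--     # Boundary starts of the 8 contiguous buckets [3..145]; offset = bucket index.
--     starts = [3, 19, 28, 88, 94, 108, 119, 128]
--     for coord in ["X_Lo", "X_Hi"]:
--         v = input_coords[coord]
--         if 3 <= v <= 145:
--             # rightmost index with starts[idx] <= v, by binary search
--             lo, hi = 0, len(starts)
--             while lo < hi:
--                 mid = (lo + hi) // 2
--                 if starts[mid] <= v:
--                     lo = mid + 1
--                 else:
--                     hi = mid
--             input_coords[coord] = v - (lo - 1)
--     return input_coords
-- ===== Notes on version B (the rewrite author's own statement) =====
-- stated objective: alternative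
-- what changed: Replaces A's per-coordinate linear scan over 8 (offset, bucket) pairs with a single guard on the global range 3..145 plus a hand-written binary search over a sorted boundary-start table; the offset is the found index.
import Mathlib
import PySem

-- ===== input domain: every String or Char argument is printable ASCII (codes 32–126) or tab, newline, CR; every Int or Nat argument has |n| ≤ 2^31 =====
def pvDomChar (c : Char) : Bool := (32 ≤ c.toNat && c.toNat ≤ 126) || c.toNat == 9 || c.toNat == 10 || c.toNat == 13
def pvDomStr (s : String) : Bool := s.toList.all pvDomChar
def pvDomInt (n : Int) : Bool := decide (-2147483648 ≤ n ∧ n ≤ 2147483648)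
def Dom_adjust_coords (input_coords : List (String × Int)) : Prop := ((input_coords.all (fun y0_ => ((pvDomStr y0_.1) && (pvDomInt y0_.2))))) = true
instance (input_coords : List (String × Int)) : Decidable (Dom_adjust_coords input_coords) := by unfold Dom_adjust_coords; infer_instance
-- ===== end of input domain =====

-- B replaces A's linear scan over 8 bucket pairs by a binary search on a boundary-start table (alternative algorithm; return-value equivalence — both Pythons also mutate the input dict identically).
-- ===== PORT A =====
-- inner loop of A: for o, b in zip(offsets, bounds): if b[0] <= v <= b[1]: d[coord] = v - o; break
def adjA (d : PySem.Dict String Int) (coord : String) (v : Int) :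
    List (Int × Int × Int) → PySem.Dict String Int
  | [] => d
  | (o, b0, b1) :: rest =>
      if b0 ≤ v ∧ v ≤ b1 then d.insert coord (v - o) else adjA d coord v rest

-- one iteration of A's outer loop; d.get? coord = none is Python's KeyError, excluded by Pre_
def stepA (d : PySem.Dict String Int) (coord : String) : PySem.Dict String Int :=
  match d.get? coord with
  | some v => adjA d coord v
      [(0, 3, 18), (1, 19, 27), (2, 28, 87), (3, 88, 93),
       (4, 94, 107), (5, 108, 118), (6, 119, 127), (7, 128, 145)]
  | none => d

def adjust_coords (input_coords : List (String × Int)) : List (String × Int) :=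
  ((["X_Lo", "X_Hi"].foldl stepA (PySem.Dict.ofList input_coords)).items)

-- ===== PORT B =====
def startsB : List Int := [3, 19, 28, 88, 94, 108, 119, 128]

-- while lo < hi: mid = (lo+hi)//2; if starts[mid] <= v: lo = mid+1 else: hi = mid
-- (getD is exact here: mid < 8 always, so starts[mid] never raises)
def bsearchB (v : Int) (lo hi : Nat) : Nat :=
  if _h : lo < hi then
    let mid := (lo + hi) / 2
    if startsB.getD mid 0 ≤ v then bsearchB v (mid + 1) hi else bsearchB v lo mid
  else lo
termination_by hi - lo
decreasing_by all_goals omega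

def stepB (d : PySem.Dict String Int) (coord : String) : PySem.Dict String Int :=
  match d.get? coord with
  | some v =>
      if 3 ≤ v ∧ v ≤ 145 then
        d.insert coord (v - (((bsearchB v 0 8 : Nat) : Int) - 1))
      else d
  | none => d

def adjust_coords_alt (input_coords : List (String × Int)) : List (String × Int) :=
  ((["X_Lo", "X_Hi"].foldl stepB (PySem.Dict.ofList input_coords)).items)

-- ===== PRECONDITION & SPEC =====
-- Pre_ excludes exactly the inputs with no "X_Lo" or no "X_Hi" key, on which Python A raises KeyError (B raises the same way).
def Pre_adjust_coords (input_coords : List (String × Int)) : Prop :=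
  (input_coords.any (fun p => p.1 == "X_Lo")) = true ∧
  (input_coords.any (fun p => p.1 == "X_Hi")) = true
instance (input_coords : List (String × Int)) : Decidable (Pre_adjust_coords input_coords) := by
  unfold Pre_adjust_coords; infer_instance
def pvWitness_adjust_coords : (List (String × Int)) := [("X_Lo", 20), ("X_Hi", 100)]

def Spec_adjust_coords (input_coords : List (String × Int)) (out : List (String × Int)) : Prop := out = adjust_coords_alt input_coords
instance (input_coords : List (String × Int)) (out : List (String × Int)) : Decidable (Spec_adjust_coords input_coords out) := by unfold Spec_adjust_coords; infer_instance

-- ===== CLAIM (what is proved, stated in full; the proofs are below) =====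
def Claim_equal_adjust_coords : Prop := ∀ (input_coords : List (String × Int)), Dom_adjust_coords input_coords → Pre_adjust_coords input_coords → Spec_adjust_coords input_coords (adjust_coords input_coords)

-- ===== LEMMAS AND PROOFS =====
-- B's binary search over [0,8) evaluated to its decision tree on v
lemma bs_eval (v : Int) : bsearchB v 0 8 =
    (if 94 ≤ v then (if 119 ≤ v then (if 128 ≤ v then 8 else 7) else (if 108 ≤ v then 6 else 5))
     else (if 28 ≤ v then (if 88 ≤ v then 4 else 3) else (if 19 ≤ v then 2 else (if 3 ≤ v then 1 else 0)))) := by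
  repeat' (first
    | rfl
    | omega
    | split_ifs
    | (rw [bsearchB]; norm_num [startsB]))

-- one outer-loop iteration of A equals one of B, on any dict state
lemma step_eq (d : PySem.Dict String Int) (coord : String) : stepA d coord = stepB d coord := by
  unfold stepA stepB
  cases h : d.get? coord with
  | none => rfl
  | some v =>
      simp only [adjA, bs_eval]
      split_ifs <;> first | rfl | omega

-- ===== VERDICT (by name: the statement is the Claim_ definition above) =====
theorem adjust_coords_spec : Claim_equal_adjust_coords := by
  intro ic _ _
  unfold Spec_adjust_coords adjust_coords adjust_coords_alt
  simp only [List.foldl, step_eq]
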